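-- pv_equiv track=rewrite | github.com/robket/BioScripts | alignment.py | gap_distribution
-- ===== SOURCE A (Python) =====
-- from collections import defaultdict, Counter
--
-- def gap_distribution(sequence):
--   dist = Counter()
--   count_length = 0
--   for char in sequence:
--     if char == "-":
--       count_length += 1
--     elif count_length > 0:
--       dist[count_length] += 1
--       count_length = 0
--   if count_length > 0:
--     dist[count_length] += 1
--   return dist
-- ===== SOURCE B (Python) =====
-- from collections import Counter
--
--
-- def gap_distribution(sequence):
--   # Stage 1: blank out every non-gap character; stage 2: str.split() extracts
--   # the maximal gap runs as words; stage 3: tally their lengths.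
--   mask = "".join(c if c == "-" else " " for c in sequence)
--   return Counter(len(run) for run in mask.split())
-- ===== Notes on version B (the rewrite author's own statement) =====
-- stated objective: idiomatic
-- what changed: Replaces A's single-pass accumulator with reset branch and post-loop flush by three staged passes: blank every non-gap character into a space mask, let str.split() extract the maximal gap runs as words, then Counter their lengths.
import Mathlib
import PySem

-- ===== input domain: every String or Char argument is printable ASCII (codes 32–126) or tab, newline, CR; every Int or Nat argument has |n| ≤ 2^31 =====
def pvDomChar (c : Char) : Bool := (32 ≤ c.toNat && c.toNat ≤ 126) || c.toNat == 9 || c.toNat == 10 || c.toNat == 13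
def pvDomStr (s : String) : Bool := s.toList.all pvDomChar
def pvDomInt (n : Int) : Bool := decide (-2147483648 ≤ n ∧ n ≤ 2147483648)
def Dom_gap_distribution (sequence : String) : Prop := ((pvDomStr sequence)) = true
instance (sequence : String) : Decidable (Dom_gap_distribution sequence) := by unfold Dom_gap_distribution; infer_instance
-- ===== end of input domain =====

-- B replaces A's accumulator/flush loop by staged passes: mask non-gap chars to spaces,
-- str.split() extracts the maximal gap runs, Counter their lengths (idiomatic; same cost).

-- ===== PORT A =====
-- one loop step: if char == "-": count += 1; elif count > 0: dist[count] += 1; count = 0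
def gapStepA (st : PySem.Dict Int Int × Int) (c : Char) : PySem.Dict Int Int × Int :=
  if c = '-' then (st.1, st.2 + 1)
  else if 0 < st.2 then (st.1.modify st.2 0 (· + 1), 0)
  else st

-- the post-loop flush: if count_length > 0: dist[count_length] += 1
def gapFlushA (st : PySem.Dict Int Int × Int) : PySem.Dict Int Int :=
  if 0 < st.2 then st.1.modify st.2 0 (· + 1) else st.1

def gap_distribution (sequence : String) : List (Int × Int) :=
  (gapFlushA (sequence.toList.foldl gapStepA (PySem.Dict.empty, 0))).items

-- ===== PORT B =====
-- mask = "".join(c if c == "-" else " " for c in sequence)  — per-character join = String.ofList of the mapped chars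
-- return Counter(len(run) for run in mask.split())
def gap_distribution_alt (sequence : String) : List (Int × Int) :=
  (PySem.Dict.counter
      ((PySem.Str.split₀
          (String.ofList (sequence.toList.map (fun c => if c = '-' then c else ' ')))).map
        (fun run => (PySem.Str.len run : Int)))).items

-- ===== PRECONDITION & SPEC =====
def Spec_gap_distribution (sequence : String) (out : List (Int × Int)) : Prop := out = gap_distribution_alt sequence
instance (sequence : String) (out : List (Int × Int)) : Decidable (Spec_gap_distribution sequence out) := by unfold Spec_gap_distribution; infer_instance

-- ===== CLAIM (what is proved, stated in full; the proofs are below) =====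
def Claim_equal_gap_distribution : Prop := ∀ (sequence : String), Dom_gap_distribution sequence → Spec_gap_distribution sequence (gap_distribution sequence)

-- ===== LEMMAS AND PROOFS =====

-- the list of maximal '-'-run lengths of cs, with k the length of the pending run
def runsAux : List Char → Int → List Int
  | [], k => if 0 < k then [k] else []
  | c :: cs, k => if c = '-' then runsAux cs (k + 1) else (if 0 < k then [k] else []) ++ runsAux cs 0

lemma runsAux_cons_dash (cs : List Char) (k : Int) : runsAux ('-' :: cs) k = runsAux cs (k + 1) := by
  simp [runsAux]

lemma runsAux_cons_nondash {c : Char} (hc : c ≠ '-') (cs : List Char) (k : Int) :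
    runsAux (c :: cs) k = (if 0 < k then [k] else []) ++ runsAux cs 0 := by
  simp [runsAux, hc]

-- A's loop+flush builds exactly the counter-fold over the run lengths
lemma loopA_eq (cs : List Char) : ∀ (d : PySem.Dict Int Int) (k : Int), 0 ≤ k →
    gapFlushA (cs.foldl gapStepA (d, k)) = (runsAux cs k).foldl (fun d x => d.modify x 0 (· + 1)) d := by
  induction cs with
  | nil =>
    intro d k _
    simp only [List.foldl, runsAux, gapFlushA]
    split_ifs <;> simp [List.foldl]
  | cons c cs ih =>
    intro d k hk
    simp only [List.foldl, gapStepA]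
    by_cases hc : c = '-'
    · subst hc
      rw [runsAux_cons_dash]
      exact ih d (k + 1) (by omega)
    · rw [runsAux_cons_nondash hc]
      simp only [if_neg hc]
      by_cases hkp : 0 < k
      · simp only [if_pos hkp, List.foldl_append, List.foldl]
        exact ih _ 0 le_rfl
      · have hk0 : k = 0 := by omega
        simp only [hk0]
        exact ih d 0 le_rfl

-- runsAux only looks at whether a char is '-', and masking preserves that
lemma runsAux_mask (cs : List Char) : ∀ (k : Int),
    runsAux (cs.map (fun c => if c = '-' then c else ' ')) k = runsAux cs k := by
  induction cs with
  | nil => intro k; simp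
  | cons c cs ih =>
    intro k
    by_cases hc : c = '-'
    · subst hc
      rw [List.map_cons, if_pos rfl, runsAux_cons_dash, runsAux_cons_dash, ih]
    · simp only [List.map_cons, if_neg hc,
        runsAux_cons_nondash (by decide : (' ' : Char) ≠ '-'),
        runsAux_cons_nondash hc, ih]

-- whitespace split of a list of '-'s and whitespace yields exactly the '-' runs
lemma splitgo_lengths (ds : List Char) : ∀ (cur : List Char) (acc : List (List Char)),
    (∀ c ∈ ds, c ≠ '-' → PySem.Chars.isspace c = true) →
    (∀ c ∈ cur, c = '-') →
    (PySem.Chars.split₀.go ds cur acc).map (fun r => (r.length : Int))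
      = acc.reverse.map (fun r => (r.length : Int)) ++ runsAux ds (cur.length : Int) := by
  induction ds with
  | nil =>
    intro cur acc _ _
    cases cur with
    | nil => simp [PySem.Chars.split₀.go, runsAux]
    | cons x xs =>
      simp [PySem.Chars.split₀.go, runsAux, List.isEmpty]
  | cons c ds ih =>
    intro cur acc hds hcur
    by_cases hc : c = '-'
    · have hsp : PySem.Chars.isspace c = false := by subst hc; decide
      rw [show PySem.Chars.split₀.go (c :: ds) cur acc = PySem.Chars.split₀.go ds (c :: cur) acc by
        simp [PySem.Chars.split₀.go, hsp]]
      rw [ih (c :: cur) acc (fun x hx => hds x (by simp [hx]))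
        (fun x hx => (List.mem_cons.mp hx).elim (fun h => h.trans hc) (hcur x))]
      subst hc
      rw [runsAux_cons_dash,
        show ((('-' :: cur).length : Int)) = (cur.length : Int) + 1 by simp]
    · have hsp : PySem.Chars.isspace c = true := hds c (by simp) hc
      cases cur with
      | nil =>
        rw [show PySem.Chars.split₀.go (c :: ds) [] acc = PySem.Chars.split₀.go ds [] acc by
          simp [PySem.Chars.split₀.go, hsp]]
        rw [ih [] acc (fun x hx => hds x (by simp [hx])) (by simp)]
        rw [runsAux_cons_nondash hc]
        simp
      | cons x xs =>
        rw [show PySem.Chars.split₀.go (c :: ds) (x :: xs) acc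
              = PySem.Chars.split₀.go ds [] ((x :: xs).reverse :: acc) by
          simp [PySem.Chars.split₀.go, hsp, List.isEmpty]]
        rw [ih [] _ (fun y hy => hds y (by simp [hy])) (by simp)]
        rw [runsAux_cons_nondash hc]
        simp only [List.reverse_cons, List.map_append, List.map_cons, List.map_nil,
          List.length_cons, List.append_assoc]
        simp [List.length_cons]

lemma split₀_lengths (cs : List Char) :
    (PySem.Chars.split₀ (cs.map (fun c => if c = '-' then c else ' '))).map (fun r => (r.length : Int))
      = runsAux cs 0 := by
  have h := splitgo_lengths (cs.map (fun c => if c = '-' then c else ' ')) [] []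
    (by
      intro c hc hne
      rcases List.mem_map.mp hc with ⟨x, _, hx⟩
      by_cases hxd : x = '-'
      · exact absurd (by simpa [hxd] using hx.symm) hne
      · rw [← hx]; simp [hxd]; decide)
    (by simp)
  simpa [PySem.Chars.split₀, runsAux_mask] using h

-- ===== VERDICT (by name: the statement is the Claim_ definition above) =====
theorem gap_distribution_spec : Claim_equal_gap_distribution := by
  intro sequence _
  unfold Spec_gap_distribution gap_distribution gap_distribution_alt
  have hmap : (PySem.Str.split₀
        (String.ofList (sequence.toList.map (fun c => if c = '-' then c else ' ')))).map
        (fun run => (PySem.Str.len run : Int))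
      = runsAux sequence.toList 0 := by
    rw [show (fun run => (PySem.Str.len run : Int))
          = (fun l : List Char => (l.length : Int)) ∘ String.toList by
        funext r; simp [PySem.Str.len]]
    rw [← List.map_map, PySem.Str.split₀_map_toList]
    simpa [String.toList_ofList] using split₀_lengths sequence.toList
  rw [hmap, loopA_eq _ _ 0 le_rfl, PySem.Dict.counter_eq_foldl]
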